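-- pv_equiv track=rewrite | github.com/yc1999/energy_wlac | data/gwlan_traditional_dataset.py | get_pos_with_mask
-- ===== SOURCE A (Python) =====
-- def get_pos_with_mask(tgt_mask, cur_len, pad_idx):
--     n = 1
--     tgt_len = len(tgt_mask)
--     row_pos = [0] * tgt_len
--     for j in range(cur_len):
--         if tgt_mask[j]:
--             if j > 0 and tgt_mask[j - 1]:
--                 row_pos[j] = row_pos[j-1]
--             else:
--                 row_pos[j] = n
--                 n += 1
--         else:
--             row_pos[j] = n
--             n += 1
--     row_pos = [ num+pad_idx for num in row_pos ]
--     return row_pos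
-- ===== SOURCE B (Python) =====
-- def get_pos_with_mask(tgt_mask, cur_len, pad_idx):
--     # Run-length decomposition: partition positions 0..cur_len-1 into runs
--     # (each maximal stretch of masked positions is one run, each unmasked
--     # position is a run of its own), then emit each run's group index at once.
--     runs = []
--     j = 0
--     while j < cur_len:
--         if tgt_mask[j]:
--             k = j + 1
--             while k < cur_len and tgt_mask[k]:
--                 k += 1
--             runs.append(k - j)
--             j = k
--         else:
--             runs.append(1)
--             j += 1
--     out = []
--     for g, length in enumerate(runs, start=1):
--         out.extend([g + pad_idx] * length)
--     return out + [pad_idx] * (len(tgt_mask) - len(out))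
-- ===== Notes on version B (the rewrite author's own statement) =====
-- stated objective: alternative
-- what changed: Replaces A's per-position counter loop with a run-length decomposition: a while loop first partitions positions 0..cur_len-1 into runs (a maximal masked stretch is one run, each unmasked position its own run), then a second loop emits each run's 1-based group index repeated over the whole run at once; untouched tail positions get pad_idx.
import Mathlib
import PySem

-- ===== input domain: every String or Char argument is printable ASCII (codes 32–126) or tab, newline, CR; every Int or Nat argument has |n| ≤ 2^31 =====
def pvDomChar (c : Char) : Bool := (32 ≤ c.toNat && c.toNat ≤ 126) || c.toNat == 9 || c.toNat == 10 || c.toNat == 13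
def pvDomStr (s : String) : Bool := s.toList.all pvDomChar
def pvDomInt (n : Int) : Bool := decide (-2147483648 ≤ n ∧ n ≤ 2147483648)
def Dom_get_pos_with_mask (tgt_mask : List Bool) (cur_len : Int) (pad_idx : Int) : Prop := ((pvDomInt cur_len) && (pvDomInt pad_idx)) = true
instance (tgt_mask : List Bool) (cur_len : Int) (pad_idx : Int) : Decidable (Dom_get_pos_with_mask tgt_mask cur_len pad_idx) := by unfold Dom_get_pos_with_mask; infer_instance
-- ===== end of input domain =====

-- B replaces A's per-position counter loop by a run-length decomposition:
-- partition positions into runs, then emit each run's group index at once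
-- (objective: alternative algorithm, same cost).


-- ===== PORT A =====
def get_pos_with_mask (tgt_mask : List Bool) (cur_len : Int) (pad_idx : Int) : List Int :=
  let tgt_len := tgt_mask.length
  let st :=
    (PySem.List.pyRange 0 cur_len 1).foldl
      (fun (st : List Int × Int) (j : Int) =>
        if PySem.List.pyGetD tgt_mask j false then
          if decide (j > 0) && PySem.List.pyGetD tgt_mask (j - 1) false then
            (PySem.List.pySetD st.1 j (PySem.List.pyGetD st.1 (j - 1) 0), st.2)
          else
            (PySem.List.pySetD st.1 j st.2, st.2 + 1)
        else
          (PySem.List.pySetD st.1 j st.2, st.2 + 1))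
      (List.replicate tgt_len 0, 1)
  st.1.map (fun num => num + pad_idx)

-- ===== PORT B =====
-- inner while loop of Source B: advance k while k < cur_len and tgt_mask[k]
def pvFindRunEnd (mask : List Bool) (c : Int) (i : Int) : Int :=
  if h : i < c ∧ PySem.List.pyGetD mask i false = true then
    pvFindRunEnd mask c (i + 1)
  else i
termination_by (c - i).toNat
decreasing_by omega

-- termination fact for pvRunsAux (cited in its decreasing_by)
theorem pvFindRunEnd_ge (mask : List Bool) (c : Int) : ∀ i, i ≤ pvFindRunEnd mask c i := by
  intro i
  induction i using pvFindRunEnd.induct mask c with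
  | case1 i h ih => rw [pvFindRunEnd, dif_pos h]; omega
  | case2 i h => rw [pvFindRunEnd, dif_neg h]

-- outer while loop of Source B: the list of run lengths
def pvRunsAux (mask : List Bool) (c : Int) (j : Int) : List Int :=
  if h : j < c then
    if PySem.List.pyGetD mask j false then
      let k := pvFindRunEnd mask c (j + 1)
      (k - j) :: pvRunsAux mask c k
    else
      1 :: pvRunsAux mask c (j + 1)
  else []
termination_by (c - j).toNat
decreasing_by
  · have := pvFindRunEnd_ge mask c (j + 1); omega
  · omega

def get_pos_with_mask_alt (tgt_mask : List Bool) (cur_len : Int) (pad_idx : Int) : List Int :=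
  let runs := pvRunsAux tgt_mask cur_len 0
  let out :=
    (runs.foldl
      (fun (st : List Int × Int) (r : Int) =>
        (st.1 ++ List.replicate r.toNat (st.2 + pad_idx), st.2 + 1))
      ([], 1)).1
  out ++ List.replicate (tgt_mask.length - out.length) pad_idx

-- ===== PRECONDITION & SPEC =====
-- Pre_ excludes exactly cur_len > len(tgt_mask), where Python A raises IndexError.
def Pre_get_pos_with_mask (tgt_mask : List Bool) (cur_len : Int) (pad_idx : Int) : Prop :=
  cur_len ≤ (tgt_mask.length : Int)
instance (tgt_mask : List Bool) (cur_len : Int) (pad_idx : Int) : Decidable (Pre_get_pos_with_mask tgt_mask cur_len pad_idx) := by unfold Pre_get_pos_with_mask; infer_instance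

def pvWitness_get_pos_with_mask : List Bool × Int × Int := ([true, true, false, true], 3, 5)

def Spec_get_pos_with_mask (tgt_mask : List Bool) (cur_len : Int) (pad_idx : Int) (out : List Int) : Prop := out = get_pos_with_mask_alt tgt_mask cur_len pad_idx
instance (tgt_mask : List Bool) (cur_len : Int) (pad_idx : Int) (out : List Int) : Decidable (Spec_get_pos_with_mask tgt_mask cur_len pad_idx out) := by unfold Spec_get_pos_with_mask; infer_instance

-- ===== CLAIM (what is proved, stated in full; the proofs are below) =====
def Claim_equal_get_pos_with_mask : Prop := ∀ (tgt_mask : List Bool) (cur_len : Int) (pad_idx : Int), Dom_get_pos_with_mask tgt_mask cur_len pad_idx → Pre_get_pos_with_mask tgt_mask cur_len pad_idx → Spec_get_pos_with_mask tgt_mask cur_len pad_idx (get_pos_with_mask tgt_mask cur_len pad_idx)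

-- ===== LEMMAS AND PROOFS =====

-- A's loop body, named for the proofs
def pvStepA (mask : List Bool) (st : List Int × Int) (j : Int) : List Int × Int :=
  if PySem.List.pyGetD mask j false then
    if decide (j > 0) && PySem.List.pyGetD mask (j - 1) false then
      (PySem.List.pySetD st.1 j (PySem.List.pyGetD st.1 (j - 1) 0), st.2)
    else
      (PySem.List.pySetD st.1 j st.2, st.2 + 1)
  else
    (PySem.List.pySetD st.1 j st.2, st.2 + 1)

-- the group-boundary indicator characterising A's counter increments
def pvInd (mask : List Bool) (j : Int) : Int :=
  if j == 0 || !(PySem.List.pyGetD mask j false) || !(PySem.List.pyGetD mask (j - 1) false)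
  then 1 else 0

-- running prefix sums
def pvAccum (s : Int) : List Int → List Int
  | [] => []
  | x :: xs => (s + x) :: pvAccum (s + x) xs

theorem pvAccum_length (s : Int) (xs : List Int) : (pvAccum s xs).length = xs.length := by
  induction xs generalizing s with
  | nil => rfl
  | cons x xs ih => simp [pvAccum, ih]

theorem pvAccum_append (s : Int) (xs : List Int) (x : Int) :
    pvAccum s (xs ++ [x]) = pvAccum s xs ++ [s + xs.sum + x] := by
  induction xs generalizing s with
  | nil => simp [pvAccum]
  | cons y ys ih => simp [pvAccum, ih]; ring

theorem pvAccum_replicate_zero (s : Int) (m : Nat) (rest : List Int) :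
    pvAccum s (List.replicate m 0 ++ rest) = List.replicate m s ++ pvAccum s rest := by
  induction m with
  | zero => simp
  | succ m ih => simp [List.replicate_succ, pvAccum, ih]

theorem pvSet_append (P rest : List Int) (v : Int) :
    (P ++ rest).set P.length v = P ++ rest.set 0 v := by
  induction P with
  | nil => simp
  | cons x xs ih => simp [ih]

theorem pvSet_mid (P : List Int) (x : Int) (rest : List Int) (v : Int) (k : Nat)
    (h : (pvAccum 0 P).length = k) :
    (pvAccum 0 P ++ x :: rest).set k v = pvAccum 0 P ++ v :: rest := by
  subst h
  rw [pvSet_append]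
  rfl

theorem pvGetD_append (P rest : List Int) (k : Nat) (d : Int) (h : k < P.length) :
    (P ++ rest).getD k d = P.getD k d := by
  simp [List.getD_eq_getElem?_getD, List.getElem?_append_left h]

theorem pvAccum_getD_pred (d : Int) :
    ∀ (xs : List Int) (s : Int), xs ≠ [] → (pvAccum s xs).getD (xs.length - 1) d = s + xs.sum := by
  intro xs
  induction xs with
  | nil => intro s h; exact absurd rfl h
  | cons x xs ih =>
      intro s _
      by_cases hx : xs = []
      · subst hx; simp [pvAccum]
      · have h1 : 1 ≤ xs.length := List.length_pos_iff.mpr hx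
        have : (x :: xs).length - 1 = (xs.length - 1) + 1 := by simp; omega
        rw [this]
        simp only [pvAccum, List.getD_cons_succ]
        rw [ih (s + x) hx]
        simp [List.sum_cons]; ring

-- A's loop invariant: after processing range(m), the row holds the accumulated
-- indicators followed by untouched zeros, and n is 1 + their sum
theorem pvLoopA_invariant (mask : List Bool) (m : Nat) (hm : m ≤ mask.length) :
    (PySem.List.pyRange 0 (m : Int) 1).foldl (pvStepA mask) (List.replicate mask.length 0, 1)
      = (pvAccum 0 (((PySem.List.pyRange 0 (m : Int) 1).map (pvInd mask)))
           ++ List.replicate (mask.length - m) 0,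
         1 + ((PySem.List.pyRange 0 (m : Int) 1).map (pvInd mask)).sum) := by
  induction m with
  | zero => simp [pvAccum]
  | succ m ih =>
      have hm' : m ≤ mask.length := Nat.le_of_succ_le hm
      have hmlt : m < mask.length := hm
      have hcast : ((m + 1 : Nat) : Int) = (m : Int) + 1 := by push_cast; ring
      rw [hcast, PySem.List.pyRange_one_succ_right (Int.natCast_nonneg m)]
      rw [List.foldl_append, ih hm', List.map_append, List.sum_append]
      simp only [List.foldl_cons, List.foldl_nil, List.map_cons, List.map_nil,
        List.sum_cons, List.sum_nil]
      set ind := (PySem.List.pyRange 0 (m : Int) 1).map (pvInd mask) with hind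
      have hindlen : ind.length = m := by
        rw [hind]; simp [PySem.List.length_pyRange_one]
      have hPlen : (pvAccum 0 ind).length = m := by rw [pvAccum_length, hindlen]
      rw [pvAccum_append]
      have hrep : List.replicate (mask.length - m) (0 : Int)
          = 0 :: List.replicate (mask.length - (m + 1)) 0 := by
        have h : mask.length - m = (mask.length - (m + 1)) + 1 := by omega
        rw [h, List.replicate_succ]
      by_cases h0 : m = 0
      · subst h0
        have hind0 : ind = [] := List.eq_nil_of_length_eq_zero hindlen
        rw [hind0, hrep]
        simp [pvStepA, pvInd, pvAccum, PySem.List.pySetD_of_nonneg]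
      · have h1 : 1 ≤ m := Nat.one_le_iff_ne_zero.mpr h0
        have hsub : (m : Int) - 1 = ((m - 1 : Nat) : Int) := by omega
        have hpos : decide ((m : Int) > 0) = true := decide_eq_true (by exact_mod_cast h1)
        have hne : ((m : Int) == 0) = false := by
          simp only [beq_eq_false_iff_ne, ne_eq]
          exact_mod_cast h0
        simp only [pvStepA, hpos, Bool.true_and, hsub,
          PySem.List.pyGetD_natCast, PySem.List.pySetD_natCast]
        by_cases bm : mask.getD m false = true
        · by_cases bp : mask.getD (m - 1) false = true
          · -- continuation of a masked group: copy previous, indicator 0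
            have hx0 : pvInd mask (m : Int) = 0 := by
              have bm2 := bm
              have bp2 := bp
              simp only [List.getD_eq_getElem?_getD] at bm2 bp2
              simp [pvInd, hne, hsub, bm2, bp2]
            have hne2 : ind ≠ [] := by
              intro hnil; rw [hnil] at hindlen; simp at hindlen; omega
            have hget : (pvAccum 0 ind ++ List.replicate (mask.length - m) 0).getD (m - 1) 0
                = 0 + ind.sum := by
              rw [pvGetD_append _ _ _ _ (by omega)]
              have h3 := pvAccum_getD_pred 0 ind 0 hne2
              rw [hindlen] at h3
              exact h3
            rw [if_pos bm, if_pos bp, hget, hrep, pvSet_mid _ _ _ _ _ hPlen, hx0]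
            simp only [Prod.mk.injEq]
            constructor
            · have hv : (0 : Int) + ind.sum + 0 = 0 + ind.sum := by ring
              rw [hv, List.append_assoc, List.singleton_append]
            · ring
          · -- start of a masked group after a gap: indicator 1
            have hx1 : pvInd mask (m : Int) = 1 := by
              have bp2 : mask[m - 1]?.getD false = false := by
                have bp' : mask.getD (m - 1) false = false := by simpa using bp
                simpa only [List.getD_eq_getElem?_getD] using bp'
              simp [pvInd, hne, hsub, bp2]
            rw [if_pos bm, if_neg bp, hrep, pvSet_mid _ _ _ _ _ hPlen, hx1]
            simp only [Prod.mk.injEq]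
            constructor
            · have hv : (0 : Int) + ind.sum + 1 = 1 + ind.sum := by ring
              rw [hv, List.append_assoc, List.singleton_append]
            · ring
        · -- unmasked position: indicator 1
          have hx1 : pvInd mask (m : Int) = 1 := by
            have bm2 : mask[m]?.getD false = false := by
              have bm' : mask.getD m false = false := by simpa using bm
              simpa only [List.getD_eq_getElem?_getD] using bm'
            simp [pvInd, hne, hsub, bm2]
          rw [if_neg bm, hrep, pvSet_mid _ _ _ _ _ hPlen, hx1]
          simp only [Prod.mk.injEq]
          constructor
          · have hv : (0 : Int) + ind.sum + 1 = 1 + ind.sum := by ring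
            rw [hv, List.append_assoc, List.singleton_append]
          · ring

-- recursive view of B's second loop (emit runs with increasing group index)
def pvExpand (p g : Int) : List Int → List Int
  | [] => []
  | r :: rs => List.replicate r.toNat (g + p) ++ pvExpand p (g + 1) rs

theorem pvFoldlB_eq_expand (p : Int) (rs : List Int) :
    ∀ (acc : List Int) (g : Int),
      (rs.foldl
        (fun (st : List Int × Int) (r : Int) =>
          (st.1 ++ List.replicate r.toNat (st.2 + p), st.2 + 1))
        (acc, g)).1 = acc ++ pvExpand p g rs := by
  induction rs with
  | nil => intro acc g; simp [pvExpand]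
  | cons r rs ih => intro acc g; simp [pvExpand, ih]

-- the inner while loop: characterise pvFindRunEnd and the indicators over the run
theorem pvRunLem (mask : List Bool) (c : Int) :
    ∀ i, 1 ≤ i → i ≤ c → PySem.List.pyGetD mask (i - 1) false = true →
      i ≤ pvFindRunEnd mask c i ∧ pvFindRunEnd mask c i ≤ c ∧
      (pvFindRunEnd mask c i = c ∨ PySem.List.pyGetD mask (pvFindRunEnd mask c i) false = false) ∧
      (PySem.List.pyRange i c 1).map (pvInd mask)
        = List.replicate (pvFindRunEnd mask c i - i).toNat 0
            ++ (PySem.List.pyRange (pvFindRunEnd mask c i) c 1).map (pvInd mask) := by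
  intro i
  induction i using pvFindRunEnd.induct mask c with
  | case1 i h ih =>
      intro h1 hic hprev
      rw [pvFindRunEnd, dif_pos h]
      have ih' := ih (by omega) (by omega) (by simpa using h.2)
      obtain ⟨hk1, hk2, hk3, hk4⟩ := ih'
      refine ⟨by omega, hk2, hk3, ?_⟩
      rw [PySem.List.pyRange_one_cons h.1, List.map_cons, hk4]
      have hi0 : pvInd mask i = 0 := by
        have hne : (i == (0 : Int)) = false := by
          simp only [beq_eq_false_iff_ne, ne_eq]; omega
        simp [pvInd, hne, h.2, hprev]
      have hrep : (pvFindRunEnd mask c (i + 1) - i).toNat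
          = (pvFindRunEnd mask c (i + 1) - (i + 1)).toNat + 1 := by omega
      rw [hi0, hrep, List.replicate_succ]
      simp
  | case2 i h =>
      intro h1 hic hprev
      rw [pvFindRunEnd, dif_neg h]
      refine ⟨le_refl i, hic, ?_, by simp⟩
      by_cases hc : i < c
      · right
        cases hx : PySem.List.pyGetD mask i false
        · rfl
        · exact absurd ⟨hc, hx⟩ h
      · left; omega

-- the outer loop: expanding the runs from position j yields the mapped prefix sums
-- of the indicators, provided position j is a group boundary
theorem pvRunsAux_expand (mask : List Bool) (c p : Int) :
    ∀ j, 0 ≤ j →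
      (j = 0 ∨ PySem.List.pyGetD mask j false = false
        ∨ PySem.List.pyGetD mask (j - 1) false = false ∨ c ≤ j) →
      ∀ g, pvExpand p g (pvRunsAux mask c j)
        = (pvAccum (g - 1) ((PySem.List.pyRange j c 1).map (pvInd mask))).map
            (fun v => v + p) := by
  intro j
  induction j using pvRunsAux.induct mask c with
  | case1 j hjc hmj k ih =>
      intro hj0 hb g
      rw [pvRunsAux, dif_pos hjc, if_pos hmj]
      have hbj : (j = 0 ∨ PySem.List.pyGetD mask (j - 1) false = false) := by
        rcases hb with h | h | h | h
        · exact Or.inl h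
        · rw [hmj] at h; exact absurd h (by simp)
        · exact Or.inr h
        · omega
      have hindj : pvInd mask j = 1 := by
        rcases hbj with h | h
        · subst h; simp [pvInd]
        · simp [pvInd, h]
      obtain ⟨hk1, hk2, hk3, hk4⟩ :=
        pvRunLem mask c (j + 1) (by omega) (by omega) (by simpa using hmj)
      have hkdef : k = pvFindRunEnd mask c (j + 1) := rfl
      rw [← hkdef] at hk1 hk2 hk3 hk4
      have hbrec : (k = 0 ∨ PySem.List.pyGetD mask k false = false
          ∨ PySem.List.pyGetD mask (k - 1) false = false ∨ c ≤ k) := by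
        rcases hk3 with h | h
        · right; right; right; omega
        · right; left; exact h
      have ihk := ih (by omega) hbrec (g + 1)
      rw [pvExpand, ihk]
      rw [PySem.List.pyRange_one_cons hjc, List.map_cons, hindj, hk4]
      simp only [pvAccum]
      have hg : g - 1 + 1 = g := by ring
      have hg2 : g + 1 - 1 = g := by ring
      rw [hg, hg2, pvAccum_replicate_zero]
      simp only [List.map_append, List.map_cons, List.map_replicate]
      have hlen : (k - j).toNat = (k - (j + 1)).toNat + 1 := by omega
      rw [hlen, List.replicate_succ]
      simp
  | case2 j hjc hmj ih =>
      intro hj0 hb g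
      rw [pvRunsAux, dif_pos hjc, if_neg (by simpa using hmj)]
      have hmj' : PySem.List.pyGetD mask j false = false := by
        cases hx : PySem.List.pyGetD mask j false
        · rfl
        · exact absurd hx (by simpa using hmj)
      have hindj : pvInd mask j = 1 := by simp [pvInd, hmj']
      have ihj := ih (by omega) (by right; right; left; simpa using hmj') (g + 1)
      rw [pvExpand, ihj]
      rw [PySem.List.pyRange_one_cons hjc, List.map_cons, hindj]
      simp only [pvAccum, List.map_cons]
      have hg : g - 1 + 1 = g := by ring
      have hg2 : g + 1 - 1 = g := by ring
      rw [hg, hg2]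
      simp
  | case3 j hjc =>
      intro hj0 hb g
      rw [pvRunsAux, dif_neg hjc]
      rw [PySem.List.pyRange_one_eq_nil (by omega)]
      simp [pvExpand, pvAccum]

theorem pvPortA_eq (mask : List Bool) (c p : Int) :
    get_pos_with_mask mask c p
      = (((PySem.List.pyRange 0 c 1).foldl (pvStepA mask)
            (List.replicate mask.length 0, 1)).1).map (fun num => num + p) := rfl

theorem pvPortB_eq (mask : List Bool) (c p : Int) :
    get_pos_with_mask_alt mask c p
      = pvExpand p 1 (pvRunsAux mask c 0)
          ++ List.replicate (mask.length - (pvExpand p 1 (pvRunsAux mask c 0)).length) p := by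
  simp only [get_pos_with_mask_alt]
  rw [pvFoldlB_eq_expand]
  simp

-- ===== VERDICT (by name: the statement is the Claim_ definition above) =====
theorem get_pos_with_mask_spec : Claim_equal_get_pos_with_mask := by
  intro mask c p _ hpre
  unfold Spec_get_pos_with_mask
  have hB := pvRunsAux_expand mask c p 0 (le_refl 0) (Or.inl rfl) 1
  have h10 : (1 : Int) - 1 = 0 := by ring
  rw [h10] at hB
  rw [pvPortA_eq, pvPortB_eq, hB]
  by_cases hc : c < 0
  · have hr : PySem.List.pyRange 0 c 1 = [] := by
      rw [PySem.List.pyRange_one]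
      have h0 : (c - 0).toNat = 0 := by omega
      rw [h0]
      simp
    rw [hr]
    simp [pvAccum]
  · have hc : 0 ≤ c := by omega
    have hm : c = ((c.toNat : Nat) : Int) := by omega
    have hmle : c.toNat ≤ mask.length := by
      unfold Pre_get_pos_with_mask at hpre; omega
    rw [hm, pvLoopA_invariant mask c.toNat hmle]
    simp [PySem.List.length_pyRange_one, pvAccum_length, max_eq_left hc]
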